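-- pv_equiv track=rewrite | github.com/joseluisrt/PyLaia | laia/utils/char_to_word_seq.py | char_to_word_seq
-- ===== SOURCE A (Python) =====
-- def char_to_word_seq(sequence_of_characters, delimiters):
--     # type: (Iterable, Union[List,Tuple]) -> List[List]
--     """Convert a sequence of characters into a sequence of words.
--
--     Examples:
--         >>> char_to_word_seq(' hello my  friend ', [' '])
--         [['h', 'e', 'l', 'l', 'o'], ['m', 'y'], ['f', 'r', 'i', 'e', 'n', 'd']]
--         >>> char_to_word_seq([-2, 1, 2, 3, -1, 1, 2, -2, 3], [-1, -2])
--         [[1, 2, 3], [1, 2], [3]]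
--
--     Args:
--         sequence_of_characters (iterable): A list of symbols representing the
--             characters in a sentence.
--         delimiters (iterable): A set of symbols representing the word
--             delimiters. Any sequence of characters
--
--     Returns:
--         A list of lists containing the characters that form each word.
--         Delimiters are not included.
--     """
--     delimiters = set(delimiters)
--     word_seq = [[]]
--     prev_is_delim = True
--     for c in sequence_of_characters:
--         if c in delimiters:
--             if not prev_is_delim:
--                 word_seq.append([])
--             prev_is_delim = True
--         else:
--             word_seq[-1].append(c)
--             prev_is_delim = False
--     if not word_seq[-1]:
--         word_seq = word_seq[:-1]
--     return word_seq
-- ===== SOURCE B (Python) =====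
-- def char_to_word_seq(sequence_of_characters, delimiters):
--     delimiters = set(delimiters)
--     chars = list(sequence_of_characters)
--     n = len(chars)
--     words = []
--     i = 0
--     while i < n:
--         if chars[i] in delimiters:
--             i += 1
--         else:
--             j = i + 1
--             while j < n and chars[j] not in delimiters:
--                 j += 1
--             words.append(chars[i:j])
--             i = j
--     return words
-- ===== Notes on version B (the rewrite author's own statement) =====
-- stated objective: alternative
-- what changed: Replaces A's prev_is_delim state machine (which appends to a growing last word and strips a trailing empty word at the end) with a two-pointer index scan that skips delimiters and slices out each maximal non-delimiter run directly, so no empty word is ever created.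
import Mathlib
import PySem

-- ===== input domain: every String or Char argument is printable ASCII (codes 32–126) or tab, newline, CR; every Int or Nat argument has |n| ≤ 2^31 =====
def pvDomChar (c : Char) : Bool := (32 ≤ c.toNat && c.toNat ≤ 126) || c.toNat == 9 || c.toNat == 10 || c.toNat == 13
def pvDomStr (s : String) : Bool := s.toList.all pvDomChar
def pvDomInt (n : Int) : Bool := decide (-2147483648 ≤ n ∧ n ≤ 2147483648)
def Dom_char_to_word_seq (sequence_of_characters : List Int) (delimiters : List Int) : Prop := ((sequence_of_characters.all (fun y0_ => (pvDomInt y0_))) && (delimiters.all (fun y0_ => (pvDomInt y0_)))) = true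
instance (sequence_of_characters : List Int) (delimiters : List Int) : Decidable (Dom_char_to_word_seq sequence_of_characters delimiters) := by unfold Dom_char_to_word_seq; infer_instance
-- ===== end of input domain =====

-- B replaces A's prev_is_delim state machine (with trailing-empty-word cleanup) by a
-- two-pointer index scan extracting each maximal non-delimiter run directly (objective: alternative).

-- ===== PORT A =====
-- word_seq[-1].append(c): the last word gets c appended (word_seq is always nonempty in A)
def pvAppendLast (ws : List (List Int)) (c : Int) : List (List Int) :=
  ws.dropLast ++ [((ws.getLast?).getD []) ++ [c]]

def pvStepA (D : PySem.Set Int) (st : List (List Int) × Bool) (c : Int) : List (List Int) × Bool :=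
  if PySem.Set.contains D c then
    (if !st.2 then st.1 ++ [[]] else st.1, true)
  else
    (pvAppendLast st.1 c, false)

-- if not word_seq[-1]: word_seq = word_seq[:-1]
def pvFinalize (ws : List (List Int)) : List (List Int) :=
  if ((ws.getLast?).getD []) = [] then ws.dropLast else ws

def char_to_word_seq (sequence_of_characters : List Int) (delimiters : List Int) : List (List Int) :=
  let D := PySem.Set.ofList delimiters
  pvFinalize (sequence_of_characters.foldl (pvStepA D) ([[]], true)).1

-- ===== PORT B =====
-- inner while loop of Source B: first index k ≥ j with k = n or chars[k] in delimiters
def pvFindRun (chars : List Int) (D : PySem.Set Int) (j : Nat) : Nat :=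
  if h : j < chars.length then
    if !PySem.Set.contains D chars[j] then pvFindRun chars D (j + 1) else j
  else j
termination_by chars.length - j

theorem pvFindRun_ge (chars : List Int) (D : PySem.Set Int) (j : Nat) :
    j ≤ pvFindRun chars D j := by
  fun_induction pvFindRun chars D j with
  | case1 j h hc ih => omega
  | case2 j h hc => omega
  | case3 j h => omega

-- outer while loop of Source B; chars[i:j] with 0 ≤ i ≤ j is (chars.drop i).take (j - i) (exact here)
def pvAltLoop (chars : List Int) (D : PySem.Set Int) (i : Nat) : List (List Int) :=
  if h : i < chars.length then
    if PySem.Set.contains D chars[i] then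
      pvAltLoop chars D (i + 1)
    else
      let j := pvFindRun chars D (i + 1)
      ((chars.drop i).take (j - i)) :: pvAltLoop chars D j
  else []
termination_by chars.length - i
decreasing_by
  · omega
  · have := pvFindRun_ge chars D (i + 1); omega

def char_to_word_seq_alt (sequence_of_characters : List Int) (delimiters : List Int) : List (List Int) :=
  let D := PySem.Set.ofList delimiters
  pvAltLoop sequence_of_characters D 0

-- ===== PRECONDITION & SPEC =====
def Spec_char_to_word_seq (sequence_of_characters : List Int) (delimiters : List Int) (out : List (List Int)) : Prop := out = char_to_word_seq_alt sequence_of_characters delimiters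
instance (sequence_of_characters : List Int) (delimiters : List Int) (out : List (List Int)) : Decidable (Spec_char_to_word_seq sequence_of_characters delimiters out) := by unfold Spec_char_to_word_seq; infer_instance

-- ===== CLAIM (what is proved, stated in full; the proofs are below) =====
def Claim_equal_char_to_word_seq : Prop := ∀ (sequence_of_characters : List Int) (delimiters : List Int), Dom_char_to_word_seq sequence_of_characters delimiters → Spec_char_to_word_seq sequence_of_characters delimiters (char_to_word_seq sequence_of_characters delimiters)

-- ===== LEMMAS AND PROOFS =====

-- canonical splitter both ports are reduced to
def pvSplitW (D : PySem.Set Int) : List Int → List (List Int)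
  | [] => []
  | c :: xs =>
    if PySem.Set.contains D c then pvSplitW D xs
    else (c :: xs.takeWhile (fun x => !PySem.Set.contains D x)) ::
         pvSplitW D (xs.dropWhile (fun x => !PySem.Set.contains D x))
termination_by xs => xs.length
decreasing_by
  · simp
  · have := List.length_dropWhile_le (fun x => !PySem.Set.contains D x) xs
    simp at this ⊢; omega

theorem pvDropLenTakeWhile (p : Int → Bool) (l : List Int) :
    l.drop ((l.takeWhile p).length) = l.dropWhile p := by
  induction l with
  | nil => rfl
  | cons a l ih => by_cases h : p a <;> simp [h, ih]

theorem pvTakeLenTakeWhile (p : Int → Bool) (l : List Int) :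
    l.take ((l.takeWhile p).length) = l.takeWhile p := by
  induction l with
  | nil => rfl
  | cons a l ih => by_cases h : p a <;> simp [h, ih]

theorem pvFinalize_nil (init : List (List Int)) : pvFinalize (init ++ [[]]) = init := by
  simp [pvFinalize]

theorem pvFinalize_ne (init : List (List Int)) (cur : List Int) (h : cur ≠ []) :
    pvFinalize (init ++ [cur]) = init ++ [cur] := by
  simp [pvFinalize, h]

theorem pvAppendLast_concat (init : List (List Int)) (cur : List Int) (c : Int) :
    pvAppendLast (init ++ [cur]) c = init ++ [cur ++ [c]] := by
  simp [pvAppendLast]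

theorem pvLoopA_both (D : PySem.Set Int) (xs : List Int) :
    (∀ init : List (List Int),
      pvFinalize (xs.foldl (pvStepA D) (init ++ [[]], true)).1 = init ++ pvSplitW D xs)
    ∧ (∀ (init : List (List Int)) (cur : List Int), cur ≠ [] →
      pvFinalize (xs.foldl (pvStepA D) (init ++ [cur], false)).1 =
        init ++ ((cur ++ xs.takeWhile (fun x => !PySem.Set.contains D x)) ::
          pvSplitW D (xs.dropWhile (fun x => !PySem.Set.contains D x)))) := by
  induction xs with
  | nil =>
    constructor
    · intro init; simpa [pvSplitW] using pvFinalize_nil init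
    · intro init cur h; simpa [pvSplitW] using pvFinalize_ne init cur h
  | cons c xs ih =>
    constructor
    · intro init
      by_cases hc : PySem.Set.contains D c = true
      · have hc' : c ∈ D := by simpa using hc
        simp only [List.foldl_cons, pvStepA, hc, if_pos, Bool.not_true]
        simpa [pvSplitW, hc'] using ih.1 init
      · have hc' : ¬ c ∈ D := by simpa using hc
        simp only [List.foldl_cons, pvStepA, hc, if_neg, Bool.false_eq_true,
          not_false_iff, pvAppendLast_concat, List.nil_append]
        rw [ih.2 init [c] (by simp)]
        simp [pvSplitW, hc']
    · intro init cur hcur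
      by_cases hc : PySem.Set.contains D c = true
      · have hc' : c ∈ D := by simpa using hc
        simp only [List.foldl_cons, pvStepA, hc, if_pos, Bool.not_false]
        have h1 := ih.1 (init ++ [cur])
        simp only [List.append_assoc, List.cons_append, List.nil_append] at h1 ⊢
        rw [h1]
        simp [pvSplitW, hc']
      · have hc' : ¬ c ∈ D := by simpa using hc
        simp only [List.foldl_cons, pvStepA, hc, if_neg, Bool.false_eq_true, not_false_iff]
        rw [pvAppendLast_concat, ih.2 init (cur ++ [c]) (by simp)]
        simp [hc']

theorem char_to_word_seq_eq_splitW (seq delims : List Int) :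
    char_to_word_seq seq delims = pvSplitW (PySem.Set.ofList delims) seq := by
  have := (pvLoopA_both (PySem.Set.ofList delims) seq).1 []
  simpa [char_to_word_seq] using this

theorem pvFindRun_eq (chars : List Int) (D : PySem.Set Int) (j : Nat) :
    pvFindRun chars D j =
      j + ((chars.drop j).takeWhile (fun x => !PySem.Set.contains D x)).length := by
  fun_induction pvFindRun chars D j with
  | case1 j h hc ih =>
    rw [List.drop_eq_getElem_cons h, List.takeWhile_cons, if_pos hc]
    simp only [List.length_cons]
    omega
  | case2 j h hc =>
    rw [List.drop_eq_getElem_cons h, List.takeWhile_cons, if_neg hc]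
    simp
  | case3 j h =>
    have : chars.drop j = [] := List.drop_eq_nil_of_le (by omega)
    simp [this]

theorem pvAltLoop_eq (chars : List Int) (D : PySem.Set Int) (i : Nat) :
    pvAltLoop chars D i = pvSplitW D (chars.drop i) := by
  fun_induction pvAltLoop chars D i with
  | case1 i h hc ih =>
    rw [ih, List.drop_eq_getElem_cons h, pvSplitW, if_pos hc]
  | case2 i h hc j ih =>
    have hd : chars.drop i = chars[i] :: chars.drop (i + 1) :=
      List.drop_eq_getElem_cons h
    have hj : j = i + 1 + ((chars.drop (i + 1)).takeWhile
        (fun x => !PySem.Set.contains D x)).length := pvFindRun_eq chars D (i + 1)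
    have htake : (chars.drop i).take (j - i) =
        chars[i] :: (chars.drop (i + 1)).takeWhile (fun x => !PySem.Set.contains D x) := by
      rw [hd, hj]
      rw [show i + 1 + ((chars.drop (i + 1)).takeWhile
            (fun x => !PySem.Set.contains D x)).length - i
          = ((chars.drop (i + 1)).takeWhile (fun x => !PySem.Set.contains D x)).length + 1
          by omega]
      rw [List.take_succ_cons, pvTakeLenTakeWhile]
    have hdrop : chars.drop j =
        (chars.drop (i + 1)).dropWhile (fun x => !PySem.Set.contains D x) := by
      rw [hj, ← List.drop_drop, pvDropLenTakeWhile]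
    rw [htake, ih, hdrop, hd, pvSplitW, if_neg hc]
  | case3 i h =>
    have : chars.drop i = [] := List.drop_eq_nil_of_le (by omega)
    rw [this, pvSplitW]

theorem char_to_word_seq_alt_eq_splitW (seq delims : List Int) :
    char_to_word_seq_alt seq delims = pvSplitW (PySem.Set.ofList delims) seq := by
  simpa [char_to_word_seq_alt] using pvAltLoop_eq seq (PySem.Set.ofList delims) 0

-- ===== VERDICT (by name: the statement is the Claim_ definition above) =====
theorem char_to_word_seq_spec : Claim_equal_char_to_word_seq := by
  intro seq delims _
  unfold Spec_char_to_word_seq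
  rw [char_to_word_seq_eq_splitW, char_to_word_seq_alt_eq_splitW]
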